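-- pv_equiv track=rewrite | github.com/cry999/AtCoder | iroha/day2/C.py | positive_princess_of_monster
-- ===== SOURCE A (Python) =====
-- def positive_princess_of_monster(N: int, H: list)->list:
--     d = {}
--     i = 0
--     for h in sorted(H):
--         if h in d:
--             continue
--         d[h] = i
--         i += 1
--
--     return [d[h]+1 for h in H]
-- ===== SOURCE B (Python) =====
-- def positive_princess_of_monster(N: int, H: list) -> list:
--     s = set(H)
--     return [1 + sum(1 for x in s if x < h) for h in H]
-- ===== Notes on version B (the rewrite author's own statement) =====
-- stated objective: alternative
-- what changed: Drops A's sort and incremental dict construction entirely: the rank of h is computed directly as 1 plus the number of distinct values smaller than h, by counting over set(H) for each element (no sorting, no lookup structure).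
import Mathlib
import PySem

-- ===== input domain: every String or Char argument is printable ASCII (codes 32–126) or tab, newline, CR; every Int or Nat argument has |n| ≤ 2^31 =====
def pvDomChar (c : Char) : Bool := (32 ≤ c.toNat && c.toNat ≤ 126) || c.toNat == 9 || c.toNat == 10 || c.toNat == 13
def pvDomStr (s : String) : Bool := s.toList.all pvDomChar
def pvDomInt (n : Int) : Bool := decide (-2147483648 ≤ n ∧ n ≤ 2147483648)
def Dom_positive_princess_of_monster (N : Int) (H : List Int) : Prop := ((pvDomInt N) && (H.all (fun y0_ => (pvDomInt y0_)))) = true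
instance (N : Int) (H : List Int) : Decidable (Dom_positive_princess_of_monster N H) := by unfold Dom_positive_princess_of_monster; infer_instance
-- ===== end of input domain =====

-- B drops A's sort+incremental-dict pass; each rank is 1 + the count of distinct values smaller than it (alternative algorithm, not faster).

-- ===== PORT A =====
-- literal port: fold over sorted(H) building the dict d and counter i, then the lookup comprehension.
-- Python's d[h] always finds h here (every h ∈ H is a key), so (get? h).getD 0 never takes the default.
def positive_princess_of_monster (N : Int) (H : List Int) : List Int :=
  let st := (PySem.List.sorted H (fun x => x)).foldl
    (fun (st : PySem.Dict Int Int × Int) h =>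
      if st.1.contains h then st else (st.1.insert h st.2, st.2 + 1))
    (PySem.Dict.empty, 0)
  H.map (fun h => (st.1.get? h).getD 0 + 1)

-- ===== PORT B =====
-- s = set(H); 1 + sum(1 for x in s if x < h)  (the generator sum is the obvious fold; order-independent over the set).
def positive_princess_of_monster_alt (N : Int) (H : List Int) : List Int :=
  let s := PySem.Set.ofList H
  H.map (fun h => 1 + s.foldl (fun acc x => if x < h then acc + 1 else acc) (0 : Int))

-- ===== PRECONDITION & SPEC =====
def Spec_positive_princess_of_monster (N : Int) (H : List Int) (out : List Int) : Prop := out = positive_princess_of_monster_alt N H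
instance (N : Int) (H : List Int) (out : List Int) : Decidable (Spec_positive_princess_of_monster N H out) := by unfold Spec_positive_princess_of_monster; infer_instance

-- ===== CLAIM (what is proved, stated in full; the proofs are below) =====
def Claim_equal_positive_princess_of_monster : Prop := ∀ (N : Int) (H : List Int), Dom_positive_princess_of_monster N H → Spec_positive_princess_of_monster N H (positive_princess_of_monster N H)

-- ===== LEMMAS AND PROOFS =====

-- B's counting fold is countP, cast to Int.
theorem foldl_count_lt (l : List Int) (h : Int) (a : Int) :
    l.foldl (fun acc x => if x < h then acc + 1 else acc) a =
      a + (l.countP (fun x => decide (x < h)) : Int) := by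
  induction l generalizing a with
  | nil => simp
  | cons x t ih =>
    simp only [List.foldl_cons, List.countP_cons, ih]
    by_cases hx : x < h <;> simp [hx] <;> ring

-- Invariant of A's dict-building fold over a (≤)-sorted list.
theorem aloop_invariant (s : List Int) (d : PySem.Dict Int Int) (i : Int)
    (hs : s.Pairwise (· ≤ ·))
    (hord : ∀ x ∈ d.keys, ∀ y ∈ s, x ≤ y)
    (hnd : d.keys.Nodup)
    (hi : i = (d.keys.length : Int))
    (hval : ∀ x v, d.get? x = some v → v = (d.keys.countP (fun k => decide (k < x)) : Int)) :
    (s.foldl (fun (st : PySem.Dict Int Int × Int) h =>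
        if st.1.contains h then st else (st.1.insert h st.2, st.2 + 1)) (d, i)).1.keys.Nodup ∧
    (∀ x, x ∈ (s.foldl (fun (st : PySem.Dict Int Int × Int) h =>
        if st.1.contains h then st else (st.1.insert h st.2, st.2 + 1)) (d, i)).1.keys ↔ x ∈ d.keys ∨ x ∈ s) ∧
    (∀ x v, (s.foldl (fun (st : PySem.Dict Int Int × Int) h =>
        if st.1.contains h then st else (st.1.insert h st.2, st.2 + 1)) (d, i)).1.get? x = some v →
      v = ((s.foldl (fun (st : PySem.Dict Int Int × Int) h =>
        if st.1.contains h then st else (st.1.insert h st.2, st.2 + 1)) (d, i)).1.keys.countP (fun k => decide (k < x)) : Int)) := by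
  induction s generalizing d i with
  | nil => exact ⟨hnd, by simp, hval⟩
  | cons h t ih =>
    rw [List.pairwise_cons] at hs
    simp only [List.foldl_cons]
    by_cases hc : d.contains h = true
    · simp only [hc, if_true]
      obtain ⟨n1, m1, v1⟩ := ih d i hs.2
        (fun x hx y hy => hord x hx y (List.mem_cons_of_mem _ hy)) hnd hi hval
      refine ⟨n1, fun x => ?_, v1⟩
      rw [m1]
      have hhk : h ∈ d.keys := (PySem.Dict.contains_iff_mem_keys d h).mp hc
      simp only [List.mem_cons]
      constructor
      · rintro (hx | hx)
        · exact Or.inl hx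
        · exact Or.inr (Or.inr hx)
      · rintro (hx | rfl | hx)
        · exact Or.inl hx
        · exact Or.inl hhk
        · exact Or.inr hx
    · have hc' : d.contains h = false := by simpa using hc
      simp only [hc', Bool.false_eq_true, if_false]
      have hkeys' : (d.insert h i).keys = d.keys ++ [h] :=
        PySem.Dict.keys_insert_of_not_contains d i hc'
      have hmemh : h ∉ d.keys := fun hm => hc ((PySem.Dict.contains_iff_mem_keys d h).mpr hm)
      have hord' : ∀ x ∈ (d.insert h i).keys, ∀ y ∈ t, x ≤ y := by
        rw [hkeys']
        intro x hx y hy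
        rcases List.mem_append.mp hx with hx | hx
        · exact hord x hx y (List.mem_cons_of_mem _ hy)
        · simp only [List.mem_singleton] at hx
          subst hx
          exact hs.1 y hy
      have hnd' : (d.insert h i).keys.Nodup := by
        rw [hkeys']
        refine List.Nodup.append hnd (List.nodup_singleton h) ?_
        intro a ha hb
        simp only [List.mem_singleton] at hb
        exact hmemh (hb ▸ ha)
      have hi' : i + 1 = ((d.insert h i).keys.length : Int) := by
        rw [hkeys']
        simp only [List.length_append, List.length_singleton]
        push_cast
        omega
      have hall : ∀ a ∈ d.keys, a < h := by
        intro a ha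
        have h1 : a ≤ h := hord a ha h List.mem_cons_self
        have h2 : a ≠ h := fun he => hmemh (he ▸ ha)
        exact lt_of_le_of_ne h1 h2
      have hval' : ∀ x v, (d.insert h i).get? x = some v →
          v = ((d.insert h i).keys.countP (fun k => decide (k < x)) : Int) := by
        intro x v hxv
        rw [PySem.Dict.get?_insert] at hxv
        rw [hkeys', List.countP_append]
        by_cases hx : x = h
        · subst hx
          rw [if_pos rfl] at hxv
          injection hxv with hxv
          have hcnt : d.keys.countP (fun k => decide (k < x)) = d.keys.length :=
            List.countP_eq_length.mpr (fun a ha => by simpa using hall a ha)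
          have hz : [x].countP (fun k => decide (k < x)) = 0 := by simp
          rw [hcnt, hz]
          push_cast
          omega
        · rw [if_neg hx] at hxv
          have hxk : x ∈ d.keys := by
            have : d.contains x = true := by
              rw [PySem.Dict.contains_eq_isSome_get?, hxv]; rfl
            exact (PySem.Dict.contains_iff_mem_keys d x).mp this
          have hxh : x ≤ h := hord x hxk h List.mem_cons_self
          have hz : [h].countP (fun k => decide (k < x)) = 0 := by
            simp only [List.countP_singleton]
            simp [not_lt.mpr hxh]
          rw [hz, Nat.add_zero]
          exact hval x v hxv
      obtain ⟨n1, m1, v1⟩ := ih (d.insert h i) (i + 1) hs.2 hord' hnd' hi' hval'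
      refine ⟨n1, fun x => ?_, v1⟩
      rw [m1, hkeys']
      simp only [List.mem_append, List.mem_cons]
      tauto

-- ===== VERDICT (by name: the statement is the Claim_ definition above) =====
theorem positive_princess_of_monster_spec : Claim_equal_positive_princess_of_monster := by
  intro N H _
  unfold Spec_positive_princess_of_monster positive_princess_of_monster positive_princess_of_monster_alt
  apply List.map_congr_left
  intro h hh
  have hp : (PySem.List.sorted H (fun x => x)).Pairwise (· ≤ ·) :=
    PySem.List.sorted_pairwise H (fun x => x)
  have hperm : (PySem.List.sorted H (fun x => x)).Perm H :=
    PySem.List.sorted_perm H (fun x => x) false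
  obtain ⟨hnd, hmem, hval⟩ := aloop_invariant (PySem.List.sorted H (fun x => x))
    PySem.Dict.empty 0 hp (by simp) (by simp) (by simp) (by simp)
  set res := ((PySem.List.sorted H (fun x => x)).foldl
    (fun (st : PySem.Dict Int Int × Int) h =>
      if st.1.contains h then st else (st.1.insert h st.2, st.2 + 1))
    (PySem.Dict.empty, 0)) with hres
  have hh_s : h ∈ PySem.List.sorted H (fun x => x) := hperm.mem_iff.mpr hh
  have hmemk : h ∈ res.1.keys := (hmem h).mpr (by simp [hh_s])
  have hsome : (res.1.get? h).isSome := by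
    rw [← PySem.Dict.contains_eq_isSome_get?]
    exact (PySem.Dict.contains_iff_mem_keys res.1 h).mpr hmemk
  obtain ⟨v, hv⟩ := Option.isSome_iff_exists.mp hsome
  have hvv := hval h v hv
  have hndB : (PySem.Set.ofList H : List Int).Nodup := PySem.Set.nodup_ofList H
  have hpermk : res.1.keys.Perm (PySem.Set.ofList H) := by
    refine (List.perm_ext_iff_of_nodup hnd hndB).mpr (fun a => ?_)
    simp [hmem a, hperm.mem_iff, PySem.Set.mem_ofList]
  have hcount : res.1.keys.countP (fun k => decide (k < h)) =
      (PySem.Set.ofList H : List Int).countP (fun k => decide (k < h)) :=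
    hpermk.countP_congr (fun x _ => rfl)
  rw [hv]
  simp only [Option.getD_some]
  rw [foldl_count_lt, hvv, hcount]
  ring
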